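-- pv_equiv track=rewrite | github.com/rbogast/blessed-rl | game/worldgen/layers/rogue_layers.py | _define_grid_cells
-- ===== SOURCE A (Python) =====
-- from typing import List, Set, Tuple, Dict, Any, Optional
--
-- def _define_grid_cells(width: int, height: int) -> List[List[Tuple[int, int, int, int]]]:
--     """Define the 3x3 grid cells for room placement."""
--     # For 23x45, create cells of size ~15x7-8
--     grid_cells = []
--
--     # Calculate cell dimensions
--     cell_width = width // 3  # 15
--     cell_height = height // 3  # 7 or 8
--
--     for gy in range(3):
--         row = []
--         for gx in range(3):
--             x_start = gx * cell_width
--             y_start = gy * cell_height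
--
--             # Handle remainder for rightmost and bottom cells
--             if gx == 2:  # Last column
--                 cell_w = width - x_start
--             else:
--                 cell_w = cell_width
--
--             if gy == 2:  # Last row
--                 cell_h = height - y_start
--             else:
--                 cell_h = cell_height
--
--             row.append((x_start, y_start, cell_w, cell_h))
--         grid_cells.append(row)
--
--     return grid_cells
-- ===== SOURCE B (Python) =====
-- from typing import List, Tuple
--
-- def _split_segments(offset: int, remaining: int, unit: int, n: int) -> List[Tuple[int, int]]:
--     """Recursively cut a segment into n pieces: each cut removes `unit`, the base case keeps whatever remains."""
--     if n == 1:
--         return [(offset, remaining)]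
--     return [(offset, unit)] + _split_segments(offset + unit, remaining - unit, unit, n - 1)
--
-- def _define_grid_cells(width: int, height: int) -> List[List[Tuple[int, int, int, int]]]:
--     """Define the 3x3 grid cells by recursively splitting each axis, then crossing the two segment lists."""
--     cols = _split_segments(0, width, width // 3, 3)
--     rows = _split_segments(0, height, height // 3, 3)
--     return [[(x, y, w, h) for (x, w) in cols] for (y, h) in rows]
-- ===== Notes on version B (the rewrite author's own statement) =====
-- stated objective: alternative
-- what changed: B replaces A's nested index loops with per-cell last-row/column conditionals by a recursive axis splitter that carries a running offset and remaining length (the remainder falls out at the recursion's base case) and then forms the grid as a cross product of the two segment lists.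
import Mathlib
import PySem

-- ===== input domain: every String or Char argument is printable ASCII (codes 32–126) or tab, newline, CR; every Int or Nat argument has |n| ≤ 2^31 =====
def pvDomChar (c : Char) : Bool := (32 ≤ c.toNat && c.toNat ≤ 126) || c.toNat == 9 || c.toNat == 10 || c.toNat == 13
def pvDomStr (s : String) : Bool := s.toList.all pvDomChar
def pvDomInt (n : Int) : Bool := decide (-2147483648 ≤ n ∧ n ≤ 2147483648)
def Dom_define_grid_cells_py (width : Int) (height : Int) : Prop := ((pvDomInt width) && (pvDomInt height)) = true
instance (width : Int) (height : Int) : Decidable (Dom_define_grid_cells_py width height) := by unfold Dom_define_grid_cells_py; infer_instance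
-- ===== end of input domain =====

-- B replaces A's index loops with last-row/column conditionals by a recursive axis splitter
-- (running offset + remaining length; the remainder falls out at the base case) crossed over both axes (objective: alternative).

-- ===== PORT A =====
def define_grid_cells_py (width : Int) (height : Int) : List (List (Int × Int × Int × Int)) :=
  let cell_width := PySem.Int.floordiv width 3
  let cell_height := PySem.Int.floordiv height 3
  (PySem.List.pyRange 0 3 1).foldl (fun grid_cells gy =>
    let row := (PySem.List.pyRange 0 3 1).foldl (fun row gx =>
      let x_start := gx * cell_width
      let y_start := gy * cell_height
      let cell_w := if gx == 2 then width - x_start else cell_width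
      let cell_h := if gy == 2 then height - y_start else cell_height
      row ++ [(x_start, y_start, cell_w, cell_h)]) []
    grid_cells ++ [row]) []

-- ===== PORT B =====
-- recursion on n : Nat mirrors Source B's _split_segments (n ≥ 1 in every call; n = 0 unreachable, returns []).
def split_segments (offset : Int) (remaining : Int) (unit : Int) (n : Nat) : List (Int × Int) :=
  match n with
  | 0 => []
  | 1 => [(offset, remaining)]
  | Nat.succ m => (offset, unit) :: split_segments (offset + unit) (remaining - unit) unit m

def define_grid_cells_py_alt (width : Int) (height : Int) : List (List (Int × Int × Int × Int)) :=
  let cols := split_segments 0 width (PySem.Int.floordiv width 3) 3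
  let rows := split_segments 0 height (PySem.Int.floordiv height 3) 3
  rows.map (fun yh => cols.map (fun xw => (xw.1, yh.1, xw.2, yh.2)))

-- ===== PRECONDITION & SPEC =====
def Spec_define_grid_cells_py (width : Int) (height : Int) (out : List (List (Int × Int × Int × Int))) : Prop := out = define_grid_cells_py_alt width height
instance (width : Int) (height : Int) (out : List (List (Int × Int × Int × Int))) : Decidable (Spec_define_grid_cells_py width height out) := by unfold Spec_define_grid_cells_py; infer_instance

-- ===== CLAIM (what is proved, stated in full; the proofs are below) =====
def Claim_equal_define_grid_cells_py : Prop := ∀ (width : Int) (height : Int), Dom_define_grid_cells_py width height → Spec_define_grid_cells_py width height (define_grid_cells_py width height)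

-- ===== LEMMAS AND PROOFS =====

-- ===== VERDICT (by name: the statement is the Claim_ definition above) =====
theorem define_grid_cells_py_spec : Claim_equal_define_grid_cells_py := by
  intro w h _
  show _ = _
  simp [define_grid_cells_py, define_grid_cells_py_alt, split_segments,
        PySem.List.pyRange, PySem.Int.floordiv, List.range_succ]
  ring_nf
  simp
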